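-- pv_equiv track=rewrite | github.com/kimjune01/june.kim | worklog/h9_bgp_summary.py | compute_reachability_set
-- ===== SOURCE A (Python) =====
-- def compute_reachability_set(active_edges, M, k):
--     n = 2 * k
--     INF = float('inf')
--     reach = [[INF] * n for _ in range(n)]
--     for u in range(n):
--         reach[u][u] = 0
--     edge_list = sorted([(i, k + j, M[i][j]) for (i, j) in active_edges], key=lambda e: e[2])
--     changed = True
--     while changed:
--         changed = False
--         for (u, v, t) in edge_list:
--             for src in range(n):
--                 if reach[src][u] <= t and t < reach[src][v]:
--                     reach[src][v] = t
--                     changed = True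
--                 if reach[src][v] <= t and t < reach[src][u]:
--                     reach[src][u] = t
--                     changed = True
--     reachable = set()
--     for u in range(n):
--         for v in range(n):
--             if u != v and reach[u][v] < INF:
--                 reachable.add((u, v))
--     return reachable
-- ===== SOURCE B (Python) =====
-- def compute_reachability_set(active_edges, M, k):
--     n = 2 * k
--     edges = sorted([(i, k + j, M[i][j]) for (i, j) in active_edges], key=lambda e: e[2])
--     arr = [[None] * n for _ in range(n)]
--     for u in range(n):
--         arr[u][u] = 0
--     i = 0
--     E = len(edges)
--     while i < E:
--         t = edges[i][2]
--         batch = []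
--         while i < E and edges[i][2] == t:
--             batch.append((edges[i][0], edges[i][1]))
--             i += 1
--         nodes = []
--         for (u, v) in batch:
--             if u not in nodes:
--                 nodes.append(u)
--             if v not in nodes:
--                 nodes.append(v)
--         for src in range(n):
--             row = arr[src]
--             S = [x for x in nodes if row[x] is not None and row[x] <= t]
--             Sset = set(S)  # mirror of S for O(1) membership; Sset == set(S) throughout
--             for _ in range(len(nodes)):
--                 before = len(S)
--                 for (u, v) in batch:
--                     if u in Sset and v not in Sset:
--                         S.append(v)
--                         Sset.add(v)
--                     if v in Sset and u not in Sset: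
--                         S.append(u)
--                         Sset.add(u)
--                 if len(S) == before:
--                     break
--             for x in S:
--                 if row[x] is None or row[x] > t:
--                     row[x] = t
--     out = set()
--     for u in range(n):
--         for v in range(n):
--             if u != v and arr[u][v] is not None:
--                 out.add((u, v))
--     return out
-- ===== Notes on version B (the rewrite author's own statement) =====
-- stated objective: alternative
-- what changed: A's repeat-until-convergence relaxation over the whole edge list is replaced by a single increasing-time sweep over the sorted edges that closes each equal-timestamp batch once with a bounded per-source set-closure.
-- outside the precondition, e.g. on compute_reachability_set([(5, 0)], [[1]], 1): A raises IndexError, B raises IndexError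
import Mathlib
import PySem

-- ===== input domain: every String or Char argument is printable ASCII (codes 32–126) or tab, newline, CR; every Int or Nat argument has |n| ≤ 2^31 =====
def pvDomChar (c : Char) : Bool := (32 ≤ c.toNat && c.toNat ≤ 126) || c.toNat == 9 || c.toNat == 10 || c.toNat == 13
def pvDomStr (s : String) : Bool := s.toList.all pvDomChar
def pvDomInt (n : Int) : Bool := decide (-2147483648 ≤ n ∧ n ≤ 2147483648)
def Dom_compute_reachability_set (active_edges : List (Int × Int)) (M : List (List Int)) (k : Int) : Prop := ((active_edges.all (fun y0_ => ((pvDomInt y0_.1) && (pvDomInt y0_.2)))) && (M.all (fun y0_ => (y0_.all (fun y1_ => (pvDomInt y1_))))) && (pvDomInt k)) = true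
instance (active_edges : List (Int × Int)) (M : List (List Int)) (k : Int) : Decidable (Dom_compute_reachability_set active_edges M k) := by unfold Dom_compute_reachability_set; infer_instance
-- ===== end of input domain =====

-- B replaces A's repeat-until-convergence relaxation of an n×n time matrix by a single
-- increasing-time sweep over the sorted edges, closing each equal-timestamp batch with a
-- bounded set-closure (a different algorithm of similar cost).
-- Matrix cells are Option Int: none = float('inf'), some x = arrival time x.

-- ===== PORT A =====
abbrev PVState := List (List (Option Int))

-- reach[src][u] <= t   (false for INF)
def pvVle (a : Option Int) (t : Int) : Bool :=
  match a with
  | none => false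
  | some x => decide (x ≤ t)

-- t < reach[src][v]    (true for INF)
def pvTlt (t : Int) (a : Option Int) : Bool :=
  match a with
  | none => true
  | some x => decide (t < x)

-- read reach[r][c]; out-of-range reads only happen outside Pre_ (Python would raise there)
def pvGetc (s : PVState) (r c : Int) : Option Int :=
  if 0 ≤ r ∧ 0 ≤ c then (s.getD r.toNat []).getD c.toNat none else none

-- guard: the cell (r,c) exists (always true inside Pre_; Python raises otherwise)
def pvCellOK (s : PVState) (r c : Int) : Bool :=
  decide (0 ≤ r) && decide (r.toNat < s.length) && decide (0 ≤ c) &&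
    decide (c.toNat < (s.getD r.toNat []).length)

-- write reach[r][c] = v (only ever called under pvCellOK)
def pvSetc (s : PVState) (r c : Int) (v : Option Int) : PVState :=
  s.set r.toNat ((s.getD r.toNat []).set c.toNat v)

-- reach = [[INF]*n for _ in range(n)]; for u in range(n): reach[u][u] = 0
def pvInit (n : Int) : PVState :=
  (PySem.List.pyRange 0 n 1).foldl (fun s u => pvSetc s u u (some 0))
    (List.replicate n.toNat (List.replicate n.toNat none))

-- sorted([(i, k + j, M[i][j]) for (i, j) in active_edges], key=lambda e: e[2])
def pvEdges (active_edges : List (Int × Int)) (M : List (List Int)) (k : Int) :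
    List (Int × Int × Int) :=
  PySem.List.sorted
    (active_edges.map (fun p => (p.1, k + p.2, PySem.List.pyGetD (PySem.List.pyGetD M p.1 []) p.2 0)))
    (fun e => e.2.2) false

-- one 'if reach[src][a] <= t and t < reach[src][b]: reach[src][b] = t; changed = True'
def pvAHalf (src a b t : Int) (acc : PVState × Bool) : PVState × Bool :=
  if pvCellOK acc.1 src b && pvVle (pvGetc acc.1 src a) t && pvTlt t (pvGetc acc.1 src b) then
    (pvSetc acc.1 src b (some t), true)
  else acc

-- both updates of the edge (u, v, t) for one src
def pvAStep (e : Int × Int × Int) (src : Int) (acc : PVState × Bool) : PVState × Bool :=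
  pvAHalf src e.2.1 e.1 e.2.2 (pvAHalf src e.1 e.2.1 e.2.2 acc)

-- 'for (u, v, t) in edge_list: for src in range(n): …', with the changed flag
def pvAPass (n : Int) (edges : List (Int × Int × Int)) (s : PVState) : PVState × Bool :=
  edges.foldl (fun acc e => (PySem.List.pyRange 0 n 1).foldl (fun a2 src => pvAStep e src a2) acc)
    (s, false)

-- value ordering used only for the termination measure of the while loop
def pvRank (av : List Int) (v : Option Int) : Nat :=
  match v with
  | none => av.length
  | some x => av.countP (fun w => decide (w < x))

def pvPhi (av : List Int) (s : PVState) : Nat :=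
  (s.map (fun row => (row.map (pvRank av)).sum)).sum

theorem pv_countP_lt_countP {l : List Int} {p q : Int → Bool}
    (himp : ∀ a, p a = true → q a = true) {r : Int} (hr : r ∈ l)
    (hq : q r = true) (hp : p r = false) : l.countP p < l.countP q := by
  induction l with
  | nil => cases hr
  | cons a l ih =>
    rcases List.mem_cons.mp hr with h | h
    · subst h
      have hle : l.countP p ≤ l.countP q := List.countP_mono_left (fun a _ => himp a)
      simp only [List.countP_cons, hp, hq]
      simp only [if_true, Bool.false_eq_true, if_false]
      omega
    · have := ih h
      simp only [List.countP_cons]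
      split_ifs with h1 h2 h3 <;> try omega
      exact absurd (himp a h1) h2

theorem pvRank_lt {av : List Int} {t : Int} {old : Option Int}
    (ht : t ∈ av) (hlt : pvTlt t old = true) : pvRank av (some t) < pvRank av old := by
  cases old with
  | none =>
    simp only [pvRank]
    have hle := List.countP_le_length (l := av) (p := fun w => decide (w < t))
    rcases Nat.lt_or_ge (av.countP (fun w => decide (w < t))) av.length with h | h
    · exact h
    · exfalso
      have heq : av.countP (fun w => decide (w < t)) = av.length := le_antisymm hle h
      have := List.countP_eq_length.mp heq t ht
      simp at this
  | some x =>
    simp only [pvTlt, decide_eq_true_eq] at hlt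
    simp only [pvRank]
    exact pv_countP_lt_countP
      (fun a ha => by simp only [decide_eq_true_eq] at ha ⊢; omega)
      ht (by simp [hlt]) (by simp)

theorem pv_map_sum_set {α : Type} (f : α → Nat) :
    ∀ (l : List α) (i : Nat) (a : α), (h : i < l.length) →
      ((l.set i a).map f).sum + f l[i] = (l.map f).sum + f a := by
  intro l
  induction l with
  | nil => intro i a h; simp at h
  | cons x l ih =>
    intro i a h
    cases i with
    | zero => simp [List.set]; omega
    | succ i =>
      simp only [List.set, List.map_cons, List.sum_cons, List.getElem_cons_succ]
      have := ih i a (by simpa using Nat.lt_of_succ_lt_succ h)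
      omega

theorem pvPhi_setc (av : List Int) (s : PVState) (r c : Int) (v : Option Int)
    (h : pvCellOK s r c = true) :
    pvPhi av (pvSetc s r c v) + pvRank av (pvGetc s r c) = pvPhi av s + pvRank av v := by
  simp only [pvCellOK, Bool.and_eq_true, decide_eq_true_eq] at h
  obtain ⟨⟨⟨hr0, hrl⟩, hc0⟩, hcl⟩ := h
  have hrow : s.getD r.toNat [] = s[r.toNat] := List.getD_eq_getElem s [] hrl
  rw [hrow] at hcl
  have hget : pvGetc s r c = s[r.toNat][c.toNat] := by
    simp only [pvGetc, if_pos (And.intro hr0 hc0), hrow]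
    exact List.getD_eq_getElem _ none hcl
  have houter := pv_map_sum_set (fun row => (row.map (pvRank av)).sum) s r.toNat
    ((s.getD r.toNat []).set c.toNat v) hrl
  have hinner := pv_map_sum_set (pvRank av) s[r.toNat] c.toNat v hcl
  simp only [pvPhi, pvSetc, hget]
  rw [hrow] at houter ⊢
  omega

theorem pvAHalf_phi (av : List Int) (src a b t : Int) (acc : PVState × Bool) (ht : t ∈ av) :
    pvPhi av (pvAHalf src a b t acc).1 ≤ pvPhi av acc.1 ∧
      ((pvAHalf src a b t acc).2 = true → acc.2 = true ∨
        pvPhi av (pvAHalf src a b t acc).1 < pvPhi av acc.1) := by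
  unfold pvAHalf
  by_cases hc : (pvCellOK acc.1 src b && pvVle (pvGetc acc.1 src a) t
      && pvTlt t (pvGetc acc.1 src b)) = true
  · simp only [hc, if_true]
    simp only [Bool.and_eq_true] at hc
    have hphi := pvPhi_setc av acc.1 src b (some t) hc.1.1
    have hrank := pvRank_lt ht hc.2
    constructor
    · omega
    · intro _; right; omega
  · simp only [Bool.not_eq_true] at hc
    simp [hc]

theorem pv_foldl_phi {α : Type} (av : List Int)
    (f : α → PVState × Bool → PVState × Bool) (L : List α)
    (hf : ∀ x ∈ L, ∀ acc, pvPhi av (f x acc).1 ≤ pvPhi av acc.1 ∧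
      ((f x acc).2 = true → acc.2 = true ∨ pvPhi av (f x acc).1 < pvPhi av acc.1)) :
    ∀ acc, pvPhi av (L.foldl (fun a x => f x a) acc).1 ≤ pvPhi av acc.1 ∧
      ((L.foldl (fun a x => f x a) acc).2 = true → acc.2 = true ∨
        pvPhi av (L.foldl (fun a x => f x a) acc).1 < pvPhi av acc.1) := by
  induction L with
  | nil => intro acc; simp
  | cons x L ih =>
    intro acc
    simp only [List.foldl_cons]
    have h1 := hf x (List.mem_cons_self) acc
    have h2 := ih (fun y hy => hf y (List.mem_cons_of_mem _ hy)) (f x acc)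
    constructor
    · omega
    · intro hfl
      rcases h2.2 hfl with h | h
      · rcases h1.2 h with h' | h'
        · left; exact h'
        · right; omega
      · right; omega

-- termination of A's 'while changed': every firing update strictly lowers a cell
theorem pvAPass_dec (n : Int) (edges : List (Int × Int × Int)) (av : List Int)
    (hmem : ∀ e ∈ edges, e.2.2 ∈ av) (s : PVState) :
    pvPhi av (pvAPass n edges s).1 ≤ pvPhi av s ∧
      ((pvAPass n edges s).2 = true → pvPhi av (pvAPass n edges s).1 < pvPhi av s) := by
  have h := pv_foldl_phi av
    (fun e acc => (PySem.List.pyRange 0 n 1).foldl (fun a2 src => pvAStep e src a2) acc)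
    edges
    (fun e he acc => by
      exact pv_foldl_phi av (fun src acc2 => pvAStep e src acc2) (PySem.List.pyRange 0 n 1)
        (fun src _ acc2 => by
          have h1 := pvAHalf_phi av src e.1 e.2.1 e.2.2 acc2 (hmem e he)
          have h2 := pvAHalf_phi av src e.2.1 e.1 e.2.2
            (pvAHalf src e.1 e.2.1 e.2.2 acc2) (hmem e he)
          simp only [pvAStep]
          constructor
          · omega
          · intro hfl
            rcases h2.2 hfl with h | h
            · rcases h1.2 h with h' | h'
              · left; exact h'
              · right; omega
            · right; omega)
        acc)
    (s, false)
  unfold pvAPass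
  refine ⟨h.1, fun hfl => ?_⟩
  rcases h.2 hfl with h' | h'
  · simp at h'
  · exact h'

-- 'while changed: changed = False; …'
def pvALoop (n : Int) (edges : List (Int × Int × Int)) (s : PVState) : PVState :=
  let r := pvAPass n edges s
  if h : r.2 = true then pvALoop n edges r.1 else r.1
termination_by pvPhi (0 :: edges.map (fun e => e.2.2)) s
decreasing_by
  exact (pvAPass_dec n edges _ (fun e he => List.mem_cons_of_mem _ (List.mem_map_of_mem (f := fun e => e.2.2) he)) s).2 h

def compute_reachability_set (active_edges : List (Int × Int)) (M : List (List Int)) (k : Int) :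
    List (Int × Int) :=
  let n := 2 * k
  let final := pvALoop n (pvEdges active_edges M k) (pvInit n)
  (PySem.List.pyRange 0 n 1).foldl
    (fun out u =>
      (PySem.List.pyRange 0 n 1).foldl
        (fun out2 v =>
          if u ≠ v ∧ (pvGetc final u v).isSome then PySem.Set.add out2 (u, v) else out2)
        out)
    PySem.Set.empty

-- ===== PORT B =====
-- one scan of the batch: 'for (u, v) in batch: if u in S and v not in S: S.append(v); …'
def pvBRound (batch : List (Int × Int)) (S : List Int) : List Int :=
  batch.foldl
    (fun S0 e =>
      let S1 := if e.1 ∈ S0 ∧ e.2 ∉ S0 then S0 ++ [e.2] else S0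
      if e.2 ∈ S1 ∧ e.1 ∉ S1 then S1 ++ [e.1] else S1)
    S

-- 'for _ in range(len(nodes)): before = len(S); …; if len(S) == before: break'
def pvBClosure (batch : List (Int × Int)) : Nat → List Int → List Int
  | 0, S => S
  | fuel + 1, S =>
    if (pvBRound batch S).length = S.length then pvBRound batch S
    else pvBClosure batch fuel (pvBRound batch S)

-- 'nodes': distinct endpoints of the batch, in first-appearance order
def pvBNodes (batch : List (Int × Int)) : List Int :=
  batch.foldl
    (fun acc e =>
      let a1 := if e.1 ∈ acc then acc else acc ++ [e.1]
      if e.2 ∈ a1 then a1 else a1 ++ [e.2])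
    []

-- per-src work for one batch: seeds, set closure, write t into the closed set
-- (Source B's Sset is set(S) kept in sync with the list S: 'x in Sset' ⟺ 'x ∈ S'; the port
-- carries only S and uses list membership, which is the same boolean)
def pvBProc (t : Int) (nodes : List Int) (batch : List (Int × Int)) (s : PVState) (src : Int) :
    PVState :=
  let S0 := nodes.filter (fun x => pvVle (pvGetc s src x) t)
  let S := pvBClosure batch nodes.length S0
  S.foldl
    (fun s2 x =>
      if pvCellOK s2 src x && pvTlt t (pvGetc s2 src x) then pvSetc s2 src x (some t) else s2)
    s

-- the outer 'while i < E' sweep: split off the equal-timestamp batch, process it, recurse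
def pvBLoop (n : Int) (edges : List (Int × Int × Int)) (s : PVState) : PVState :=
  match edges with
  | [] => s
  | e :: rest =>
    let t := e.2.2
    let batch := ((e :: rest).takeWhile (fun x => x.2.2 == t)).map (fun x => (x.1, x.2.1))
    let rem := (e :: rest).dropWhile (fun x => x.2.2 == t)
    let s1 := (PySem.List.pyRange 0 n 1).foldl
      (fun st src => pvBProc t (pvBNodes batch) batch st src) s
    pvBLoop n rem s1
termination_by edges.length
decreasing_by
  simp only [List.dropWhile_cons, BEq.rfl, if_true, List.length_cons]
  exact Nat.lt_succ_of_le (List.length_dropWhile_le _ _)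

def compute_reachability_set_alt (active_edges : List (Int × Int)) (M : List (List Int)) (k : Int) :
    List (Int × Int) :=
  let n := 2 * k
  let final := pvBLoop n (pvEdges active_edges M k) (pvInit n)
  (PySem.List.pyRange 0 n 1).foldl
    (fun out u =>
      (PySem.List.pyRange 0 n 1).foldl
        (fun out2 v =>
          if u ≠ v ∧ (pvGetc final u v).isSome then PySem.Set.add out2 (u, v) else out2)
        out)
    PySem.Set.empty

-- ===== PRECONDITION & SPEC =====
-- Pre_ is the function's natural domain: either k <= 0 (no nodes: A builds no matrix and
-- returns the empty set, provided each M[i][j] lookup succeeds under Python indexing), or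
-- k > 0 and every edge (i, j) has a node index 0 <= i < 2k present in M and a column index
-- -k <= j < k valid for row i (Python wraps a negative j inside the row, identically in A
-- and B).  Excluded are inputs where A raises IndexError, and edges with negative i, where
-- Python's negative-index wraparound silently aliases the edge label i to matrix column
-- n+i — not a meaningful node encoding, which B (keying nodes by their labels) does not
-- reproduce.
def Pre_compute_reachability_set (active_edges : List (Int × Int)) (M : List (List Int)) (k : Int) : Prop :=
  (k ≤ 0 ∧ ∀ p ∈ active_edges, PySem.Raise.InRange M.length p.1 ∧
      PySem.Raise.InRange (PySem.List.pyGetD M p.1 []).length p.2) ∨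
  (0 < k ∧ ∀ p ∈ active_edges,
      0 ≤ p.1 ∧ p.1 < 2 * k ∧ p.1.toNat < M.length ∧
      -k ≤ p.2 ∧ p.2 < k ∧ PySem.Raise.InRange (M.getD p.1.toNat []).length p.2)

instance (active_edges : List (Int × Int)) (M : List (List Int)) (k : Int) :
    Decidable (Pre_compute_reachability_set active_edges M k) := by
  unfold Pre_compute_reachability_set; infer_instance

def pvWitness_compute_reachability_set : (List (Int × Int)) × List (List Int) × Int :=
  ([(0, 0)], [[5]], 1)

def Spec_compute_reachability_set (active_edges : List (Int × Int)) (M : List (List Int)) (k : Int) (out : List (Int × Int)) : Prop := out = compute_reachability_set_alt active_edges M k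
instance (active_edges : List (Int × Int)) (M : List (List Int)) (k : Int) (out : List (Int × Int)) : Decidable (Spec_compute_reachability_set active_edges M k out) := by unfold Spec_compute_reachability_set; infer_instance

-- ===== CLAIM (what is proved, stated in full; the proofs are below) =====
def Claim_equal_compute_reachability_set : Prop := ∀ (active_edges : List (Int × Int)) (M : List (List Int)) (k : Int), Dom_compute_reachability_set active_edges M k → Pre_compute_reachability_set active_edges M k → Spec_compute_reachability_set active_edges M k (compute_reachability_set active_edges M k)

-- ===== LEMMAS AND PROOFS =====

-- order on cell values: none is +infinity
def pvLeV (a b : Option Int) : Prop :=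
  match b with
  | none => True
  | some y => match a with
    | none => False
    | some x => x ≤ y

def pvSLE (s s' : PVState) : Prop := ∀ r c : Int, pvLeV (pvGetc s r c) (pvGetc s' r c)

def pvShape (n : Int) (s : PVState) : Prop :=
  s.length = n.toNat ∧ ∀ row ∈ s, row.length = n.toNat

theorem pvLeV_refl (a : Option Int) : pvLeV a a := by
  cases a <;> simp [pvLeV]

theorem pvLeV_trans {a b c : Option Int} (h1 : pvLeV a b) (h2 : pvLeV b c) : pvLeV a c := by
  cases a <;> cases b <;> cases c <;> simp_all [pvLeV] <;> try omega

theorem pvLeV_antisymm {a b : Option Int} (h1 : pvLeV a b) (h2 : pvLeV b a) : a = b := by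
  cases a <;> cases b <;> simp_all [pvLeV] <;> try omega

theorem pvVle_of_leV {a b : Option Int} {t : Int} (h : pvLeV a b) (hb : pvVle b t = true) :
    pvVle a t = true := by
  cases a <;> cases b <;> simp_all [pvLeV, pvVle] <;> try omega

theorem pvTlt_eq_not_vle (t : Int) (a : Option Int) : pvTlt t a = !pvVle a t := by
  cases a with
  | none => simp [pvTlt, pvVle]
  | some x =>
    simp only [pvTlt, pvVle, ← decide_not]
    exact decide_eq_decide.mpr (by omega)

theorem pvLeV_some_of_tlt {t : Int} {a : Option Int} (h : pvTlt t a = true) :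
    pvLeV (some t) a := by
  cases a <;> simp_all [pvTlt, pvLeV] <;> try omega

theorem pvLeV_of_vle {a : Option Int} {t : Int} (h : pvVle a t = true) : pvLeV a (some t) := by
  cases a <;> simp_all [pvVle, pvLeV]

theorem pvShape_setc {n : Int} {s : PVState} (h : pvShape n s) (r c : Int) (v : Option Int) :
    pvShape n (pvSetc s r c v) := by
  obtain ⟨h1, h2⟩ := h
  by_cases hlt : r.toNat < s.length
  · refine ⟨by simp [pvSetc, h1], ?_⟩
    intro row hrow
    rcases List.mem_or_eq_of_mem_set hrow with hm | hm
    · exact h2 row hm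
    · subst hm
      rw [List.length_set, List.getD_eq_getElem s [] hlt]
      exact h2 _ (List.getElem_mem hlt)
  · have : pvSetc s r c v = s := List.set_eq_of_length_le (by omega)
    rw [this]
    exact ⟨h1, h2⟩

theorem pvCellOK_shape {n : Int} {s : PVState} (h : pvShape n s) (r c : Int) :
    pvCellOK s r c = true ↔ 0 ≤ r ∧ r < n ∧ 0 ≤ c ∧ c < n := by
  obtain ⟨h1, h2⟩ := h
  simp only [pvCellOK, Bool.and_eq_true, decide_eq_true_eq]
  constructor
  · rintro ⟨⟨⟨hr0, hrl⟩, hc0⟩, hcl⟩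
    rw [h1] at hrl
    rw [List.getD_eq_getElem s [] (by omega), h2 _ (List.getElem_mem (by omega))] at hcl
    omega
  · rintro ⟨hr0, hrn, hc0, hcn⟩
    have hrl : r.toNat < s.length := by omega
    refine ⟨⟨⟨hr0, hrl⟩, hc0⟩, ?_⟩
    rw [List.getD_eq_getElem s [] hrl, h2 _ (List.getElem_mem hrl)]
    omega

theorem pvCellOK_congr {n : Int} {s s' : PVState} (h : pvShape n s) (h' : pvShape n s')
    (r c : Int) : pvCellOK s r c = pvCellOK s' r c := by
  by_cases hb : pvCellOK s' r c = true
  · rw [hb, (pvCellOK_shape h r c).mpr ((pvCellOK_shape h' r c).mp hb)]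
  · by_cases hb2 : pvCellOK s r c = true
    · exact absurd ((pvCellOK_shape h' r c).mpr ((pvCellOK_shape h r c).mp hb2)) hb
    · simp only [Bool.not_eq_true] at hb hb2
      rw [hb, hb2]

theorem pvGetc_setc_self {s : PVState} {r c : Int} (h : pvCellOK s r c = true)
    (v : Option Int) : pvGetc (pvSetc s r c v) r c = v := by
  simp only [pvCellOK, Bool.and_eq_true, decide_eq_true_eq] at h
  obtain ⟨⟨⟨hr0, hrl⟩, hc0⟩, hcl⟩ := h
  simp only [List.getD_eq_getElem?_getD] at hcl
  simp only [pvGetc, pvSetc, if_pos (And.intro hr0 hc0)]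
  simp only [List.getD_eq_getElem?_getD, List.getElem?_set]
  have hcl' : c.toNat < (s[r.toNat]).length := by
    simpa [List.getElem?_eq_getElem hrl] using hcl
  simp [hrl, List.getElem?_set, hcl']

theorem pvGetc_setc_ne {s : PVState} {r c : Int} (h : pvCellOK s r c = true)
    (v : Option Int) {r' c' : Int} (hne : ¬(r' = r ∧ c' = c)) :
    pvGetc (pvSetc s r c v) r' c' = pvGetc s r' c' := by
  simp only [pvCellOK, Bool.and_eq_true, decide_eq_true_eq] at h
  obtain ⟨⟨⟨hr0, hrl⟩, hc0⟩, hcl⟩ := h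
  by_cases hpos : 0 ≤ r' ∧ 0 ≤ c'
  · simp only [pvGetc, pvSetc, if_pos hpos]
    simp only [List.getD_eq_getElem?_getD, List.getElem?_set]
    by_cases hr : r.toNat = r'.toNat
    · have hrr : r' = r := by omega
      have hcc : ¬ c' = c := fun hc => hne ⟨hrr, hc⟩
      have hccn : ¬ c.toNat = c'.toNat := by omega
      have hrl' : r'.toNat < s.length := by omega
      simp [hr, hrl', List.getElem?_set, hccn]
    · simp [hr]
  · simp only [pvGetc, if_neg hpos]

-- ---- A-side: characterization of one relaxation half/step/pass ----
def pvACond (src a b t : Int) (s : PVState) : Bool :=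
  pvCellOK s src b && pvVle (pvGetc s src a) t && pvTlt t (pvGetc s src b)

theorem pvACond_parts {src a b t : Int} {s : PVState} :
    pvACond src a b t s = true ↔
      pvCellOK s src b = true ∧ pvVle (pvGetc s src a) t = true ∧
        pvTlt t (pvGetc s src b) = true := by
  simp [pvACond, Bool.and_eq_true, and_assoc]

theorem pvAHalf_eq (src a b t : Int) (acc : PVState × Bool) :
    pvAHalf src a b t acc =
      if pvACond src a b t acc.1 = true then (pvSetc acc.1 src b (some t), true) else acc := by
  simp [pvAHalf, pvACond]

theorem pvAHalf_getc (src a b t : Int) (acc : PVState × Bool) (r c : Int) :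
    pvGetc (pvAHalf src a b t acc).1 r c =
      if pvACond src a b t acc.1 = true ∧ r = src ∧ c = b then some t
      else pvGetc acc.1 r c := by
  rw [pvAHalf_eq]
  by_cases hc : pvACond src a b t acc.1 = true
  · have hOK := (pvACond_parts.mp hc).1
    rw [if_pos hc]
    by_cases hrc : r = src ∧ c = b
    · have hcond : pvACond src a b t acc.1 = true ∧ r = src ∧ c = b := ⟨hc, hrc.1, hrc.2⟩
      rw [if_pos hcond, hrc.1, hrc.2]
      exact pvGetc_setc_self hOK _
    · rw [if_neg (by tauto)]
      exact pvGetc_setc_ne hOK _ hrc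
  · rw [if_neg hc, if_neg (by tauto)]

theorem pvAHalf_shape {n : Int} {acc : PVState × Bool} (h : pvShape n acc.1)
    (src a b t : Int) : pvShape n (pvAHalf src a b t acc).1 := by
  rw [pvAHalf_eq]
  split
  · exact pvShape_setc h _ _ _
  · exact h

theorem pvAHalf_le (src a b t : Int) (acc : PVState × Bool) :
    pvSLE (pvAHalf src a b t acc).1 acc.1 := by
  intro r c
  rw [pvAHalf_getc]
  split_ifs with h
  · obtain ⟨hc, hr, hb⟩ := h
    rw [hr, hb]
    exact pvLeV_some_of_tlt (pvACond_parts.mp hc).2.2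
  · exact pvLeV_refl _

theorem pvAHalf_flag_false {src a b t : Int} {acc : PVState × Bool}
    (h : (pvAHalf src a b t acc).2 = false) :
    pvAHalf src a b t acc = acc ∧ acc.2 = false ∧ pvACond src a b t acc.1 = false := by
  rw [pvAHalf_eq] at h ⊢
  by_cases hc : pvACond src a b t acc.1 = true
  · rw [if_pos hc] at h; simp at h
  · simp only [Bool.not_eq_true] at hc
    rw [if_neg (by simp [hc])] at h
    exact ⟨by rw [if_neg (by simp [hc])], h, hc⟩

theorem pvAHalf_mono {n : Int} {x y : PVState} (hx : pvShape n x) (hy : pvShape n y)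
    (h : pvSLE x y) (src a b t : Int) (fx fy : Bool) :
    pvSLE (pvAHalf src a b t (x, fx)).1 (pvAHalf src a b t (y, fy)).1 := by
  intro r c
  rw [pvAHalf_getc, pvAHalf_getc]
  by_cases hrc : r = src ∧ c = b
  · rw [hrc.1, hrc.2]
    by_cases hcx : pvACond src a b t x = true <;>
      by_cases hcy : pvACond src a b t y = true
    · rw [if_pos ⟨hcx, rfl, rfl⟩, if_pos ⟨hcy, rfl, rfl⟩]; exact pvLeV_refl _
    · rw [if_pos ⟨hcx, rfl, rfl⟩, if_neg (by tauto)]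
      exact pvLeV_trans (pvLeV_some_of_tlt (pvACond_parts.mp hcx).2.2) (h src b)
    · rw [if_neg (by tauto), if_pos ⟨hcy, rfl, rfl⟩]
      obtain ⟨hOKy, hvy, _⟩ := pvACond_parts.mp hcy
      have hOKx : pvCellOK x src b = true := by
        rw [pvCellOK_congr hx hy]; exact hOKy
      have hvx : pvVle (pvGetc x src a) t = true := pvVle_of_leV (h src a) hvy
      have htx : pvTlt t (pvGetc x src b) = false := by
        by_cases ht : pvTlt t (pvGetc x src b) = true
        · exact absurd (pvACond_parts.mpr ⟨hOKx, hvx, ht⟩) hcx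
        · simpa using ht
      have : pvVle (pvGetc x src b) t = true := by
        have := pvTlt_eq_not_vle t (pvGetc x src b)
        rw [htx] at this
        simpa using this.symm
      exact pvLeV_of_vle this
    · rw [if_neg (by tauto), if_neg (by tauto)]; exact h src b
  · rw [if_neg (by tauto), if_neg (by tauto)]; exact h r c

-- pvAStep = both halves of one edge for one src
theorem pvAStep_shape {n : Int} {acc : PVState × Bool} (h : pvShape n acc.1)
    (e : Int × Int × Int) (src : Int) : pvShape n (pvAStep e src acc).1 :=
  pvAHalf_shape (pvAHalf_shape h _ _ _ _) _ _ _ _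

theorem pvAStep_le (e : Int × Int × Int) (src : Int) (acc : PVState × Bool) :
    pvSLE (pvAStep e src acc).1 acc.1 := fun r c =>
  pvLeV_trans (pvAHalf_le _ _ _ _ _ r c) (pvAHalf_le _ _ _ _ _ r c)

theorem pvAStep_mono {n : Int} {x y : PVState × Bool} (hx : pvShape n x.1)
    (hy : pvShape n y.1) (h : pvSLE x.1 y.1) (e : Int × Int × Int) (src : Int) :
    pvSLE (pvAStep e src x).1 (pvAStep e src y).1 := by
  have h1 : pvSLE (pvAHalf src e.1 e.2.1 e.2.2 x).1 (pvAHalf src e.1 e.2.1 e.2.2 y).1 := by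
    have := pvAHalf_mono hx hy h src e.1 e.2.1 e.2.2 x.2 y.2
    simpa using this
  have hx1 := pvAHalf_shape hx src e.1 e.2.1 e.2.2
  have hy1 := pvAHalf_shape hy src e.1 e.2.1 e.2.2
  have := pvAHalf_mono hx1 hy1 h1 src e.2.1 e.1 e.2.2
    (pvAHalf src e.1 e.2.1 e.2.2 x).2 (pvAHalf src e.1 e.2.1 e.2.2 y).2
  simpa [pvAStep] using this

theorem pvAStep_flag_false {e : Int × Int × Int} {src : Int} {acc : PVState × Bool}
    (h : (pvAStep e src acc).2 = false) :
    pvAStep e src acc = acc ∧ acc.2 = false ∧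
      pvACond src e.1 e.2.1 e.2.2 acc.1 = false ∧
      pvACond src e.2.1 e.1 e.2.2 acc.1 = false := by
  unfold pvAStep at h ⊢
  obtain ⟨h2eq, h2fl, h2c⟩ := pvAHalf_flag_false h
  obtain ⟨h1eq, h1fl, h1c⟩ := pvAHalf_flag_false h2fl
  rw [h1eq] at h2eq h2c
  exact ⟨by rw [h1eq, h2eq], h1fl, h1c, h2c⟩

-- inner fold over srcs
theorem pvASrcFold_shape {n : Int} (e : Int × Int × Int) (L : List Int) :
    ∀ acc : PVState × Bool, pvShape n acc.1 →
      pvShape n (L.foldl (fun a2 src => pvAStep e src a2) acc).1 := by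
  induction L with
  | nil => intro acc h; exact h
  | cons x L ih => intro acc h; exact ih _ (pvAStep_shape h e x)

theorem pvASrcFold_le (e : Int × Int × Int) (L : List Int) :
    ∀ acc : PVState × Bool, pvSLE (L.foldl (fun a2 src => pvAStep e src a2) acc).1 acc.1 := by
  induction L with
  | nil => intro acc; exact fun r c => pvLeV_refl _
  | cons x L ih =>
    intro acc
    exact fun r c => pvLeV_trans (ih (pvAStep e x acc) r c) (pvAStep_le e x acc r c)

theorem pvASrcFold_mono {n : Int} (e : Int × Int × Int) (L : List Int) :
    ∀ x y : PVState × Bool, pvShape n x.1 → pvShape n y.1 → pvSLE x.1 y.1 →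
      pvSLE (L.foldl (fun a2 src => pvAStep e src a2) x).1
        (L.foldl (fun a2 src => pvAStep e src a2) y).1 := by
  induction L with
  | nil => intro x y _ _ h; exact h
  | cons z L ih =>
    intro x y hx hy h
    exact ih _ _ (pvAStep_shape hx e z) (pvAStep_shape hy e z) (pvAStep_mono hx hy h e z)

theorem pvASrcFold_flag_false (e : Int × Int × Int) (L : List Int) :
    ∀ acc : PVState × Bool,
      (L.foldl (fun a2 src => pvAStep e src a2) acc).2 = false →
        L.foldl (fun a2 src => pvAStep e src a2) acc = acc ∧ acc.2 = false ∧
          ∀ src ∈ L, pvACond src e.1 e.2.1 e.2.2 acc.1 = false ∧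
            pvACond src e.2.1 e.1 e.2.2 acc.1 = false := by
  induction L with
  | nil => intro acc h; exact ⟨rfl, h, by simp⟩
  | cons z L ih =>
    intro acc h
    simp only [List.foldl_cons] at h ⊢
    obtain ⟨hres, hfl, hconds⟩ := ih _ h
    obtain ⟨hstep, hfl0, hc1, hc2⟩ := pvAStep_flag_false hfl
    rw [hstep] at hres hconds
    refine ⟨by rw [hstep, hres], hfl0, ?_⟩
    intro src hsrc
    rcases List.mem_cons.mp hsrc with h' | h'
    · subst h'; exact ⟨hc1, hc2⟩
    · exact hconds src h'

theorem pvASrcFold_nofire (e : Int × Int × Int) (L : List Int) (acc : PVState × Bool)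
    (h : ∀ src ∈ L, pvACond src e.1 e.2.1 e.2.2 acc.1 = false ∧
      pvACond src e.2.1 e.1 e.2.2 acc.1 = false) :
    L.foldl (fun a2 src => pvAStep e src a2) acc = acc := by
  induction L with
  | nil => rfl
  | cons z L ih =>
    simp only [List.foldl_cons]
    have hz := h z List.mem_cons_self
    have hinner : pvAHalf z e.1 e.2.1 e.2.2 acc = acc := by
      rw [pvAHalf_eq, if_neg (by simp [hz.1])]
    have hstep : pvAStep e z acc = acc := by
      unfold pvAStep
      rw [hinner, pvAHalf_eq, if_neg (by simp [hz.2])]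
    rw [hstep]
    exact ih (fun src hs => h src (List.mem_cons_of_mem _ hs))

-- the full pass
def pvNoFire (n : Int) (edges : List (Int × Int × Int)) (s : PVState) : Prop :=
  ∀ e ∈ edges, ∀ src ∈ PySem.List.pyRange 0 n 1,
    pvACond src e.1 e.2.1 e.2.2 s = false ∧ pvACond src e.2.1 e.1 e.2.2 s = false

theorem pvAPassFold_shape {n : Int} (edges : List (Int × Int × Int)) :
    ∀ acc : PVState × Bool, pvShape n acc.1 →
      pvShape n (edges.foldl (fun acc e =>
        (PySem.List.pyRange 0 n 1).foldl (fun a2 src => pvAStep e src a2) acc) acc).1 := by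
  induction edges with
  | nil => intro acc h; exact h
  | cons e edges ih => intro acc h; exact ih _ (pvASrcFold_shape e _ acc h)

theorem pvAPassFold_le {n : Int} (edges : List (Int × Int × Int)) :
    ∀ acc : PVState × Bool, pvSLE (edges.foldl (fun acc e =>
      (PySem.List.pyRange 0 n 1).foldl (fun a2 src => pvAStep e src a2) acc) acc).1 acc.1 := by
  induction edges with
  | nil => intro acc; exact fun r c => pvLeV_refl _
  | cons e edges ih =>
    intro acc
    exact fun r c => pvLeV_trans (ih _ r c) (pvASrcFold_le e _ acc r c)

theorem pvAPass_shape {n : Int} {s : PVState} (h : pvShape n s)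
    (edges : List (Int × Int × Int)) : pvShape n (pvAPass n edges s).1 :=
  pvAPassFold_shape edges (s, false) h

theorem pvAPass_le {n : Int} (edges : List (Int × Int × Int)) (s : PVState) :
    pvSLE (pvAPass n edges s).1 s :=
  pvAPassFold_le edges (s, false)

theorem pvAPassFold_mono {n : Int} (edges : List (Int × Int × Int)) :
    ∀ x y : PVState × Bool, pvShape n x.1 → pvShape n y.1 → pvSLE x.1 y.1 →
      pvSLE (edges.foldl (fun acc e =>
          (PySem.List.pyRange 0 n 1).foldl (fun a2 src => pvAStep e src a2) acc) x).1
        (edges.foldl (fun acc e =>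
          (PySem.List.pyRange 0 n 1).foldl (fun a2 src => pvAStep e src a2) acc) y).1 := by
  induction edges with
  | nil => intro x y _ _ h; exact h
  | cons e edges ih =>
    intro x y hx hy h
    exact ih _ _ (pvASrcFold_shape e _ x hx) (pvASrcFold_shape e _ y hy)
      (pvASrcFold_mono e _ x y hx hy h)

theorem pvAPass_mono {n : Int} {x y : PVState} (hx : pvShape n x) (hy : pvShape n y)
    (h : pvSLE x y) (edges : List (Int × Int × Int)) :
    pvSLE (pvAPass n edges x).1 (pvAPass n edges y).1 :=
  pvAPassFold_mono edges (x, false) (y, false) hx hy h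

theorem pvAPass_eq_of_nofire {n : Int} {edges : List (Int × Int × Int)} {s : PVState}
    (h : pvNoFire n edges s) : pvAPass n edges s = (s, false) := by
  unfold pvAPass
  suffices hgen : ∀ (l : List (Int × Int × Int)), (∀ e ∈ l, e ∈ edges) →
      l.foldl (fun acc e =>
        (PySem.List.pyRange 0 n 1).foldl (fun a2 src => pvAStep e src a2) acc) (s, false) =
        (s, false) by
    exact hgen edges (fun e he => he)
  intro l
  induction l with
  | nil => intro _; rfl
  | cons e l ih =>
    intro hsub
    simp only [List.foldl_cons]
    rw [pvASrcFold_nofire e _ (s, false)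
      (fun src hs => h e (hsub e List.mem_cons_self) src hs)]
    exact ih (fun e' he' => hsub e' (List.mem_cons_of_mem _ he'))

theorem pvNoFire_of_pass_false {n : Int} {edges : List (Int × Int × Int)} {s : PVState}
    (h : (pvAPass n edges s).2 = false) : pvNoFire n edges s := by
  unfold pvAPass at h
  suffices hgen : ∀ (l : List (Int × Int × Int)) (acc : PVState × Bool),
      (l.foldl (fun acc e =>
        (PySem.List.pyRange 0 n 1).foldl (fun a2 src => pvAStep e src a2) acc) acc).2 = false →
      acc.2 = false ∧ ∀ e ∈ l, ∀ src ∈ PySem.List.pyRange 0 n 1,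
        pvACond src e.1 e.2.1 e.2.2 acc.1 = false ∧
          pvACond src e.2.1 e.1 e.2.2 acc.1 = false by
    intro e he src hsrc
    exact (hgen edges (s, false) h).2 e he src hsrc
  intro l
  induction l with
  | nil => intro acc h'; exact ⟨h', by simp⟩
  | cons e l ih =>
    intro acc h'
    simp only [List.foldl_cons] at h'
    obtain ⟨hfl, hrest⟩ := ih _ h'
    obtain ⟨heq, hfl0, hconds⟩ := pvASrcFold_flag_false e _ acc hfl
    rw [heq] at hrest
    refine ⟨hfl0, ?_⟩
    intro e' he' src hsrc
    rcases List.mem_cons.mp he' with hh | hh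
    · subst hh; exact hconds src hsrc
    · exact hrest e' hh src hsrc

-- the while loop
theorem pvALoop_shape {n : Int} (edges : List (Int × Int × Int)) (s : PVState)
    (h : pvShape n s) : pvShape n (pvALoop n edges s) := by
  fun_induction pvALoop n edges s with
  | case1 s r hr ih => exact ih (pvAPass_shape h edges)
  | case2 s r hr => exact pvAPass_shape h edges

theorem pvALoop_le {n : Int} (edges : List (Int × Int × Int)) (s : PVState) :
    pvSLE (pvALoop n edges s) s := by
  fun_induction pvALoop n edges s with
  | case1 s r hr ih =>
    exact fun a b => pvLeV_trans (ih a b) (pvAPass_le edges s a b)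
  | case2 s r hr => exact pvAPass_le edges s

theorem pvALoop_nofire {n : Int} (edges : List (Int × Int × Int)) (s : PVState) :
    pvNoFire n edges (pvALoop n edges s) := by
  fun_induction pvALoop n edges s with
  | case1 s r hr ih => exact ih
  | case2 s r hr =>
    have hfl : (pvAPass n edges s).2 = false := by simpa using hr
    have hnf := pvNoFire_of_pass_false hfl
    have heq : (pvAPass n edges s).1 = s := (pvAPass_eq_of_nofire hnf) ▸ rfl
    rw [heq]
    exact hnf

theorem pvALoop_glb {n : Int} {b : PVState} (edges : List (Int × Int × Int))
    (hb : pvNoFire n edges b) (hbs : pvShape n b) :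
    ∀ s : PVState, pvShape n s → pvSLE b s → pvSLE b (pvALoop n edges s) := by
  intro s
  fun_induction pvALoop n edges s with
  | case1 s r hr ih =>
    intro hs h
    refine ih (pvAPass_shape hs edges) ?_
    have := pvAPass_mono hbs hs h edges
    rw [pvAPass_eq_of_nofire hb] at this
    exact this
  | case2 s r hr =>
    intro hs h
    have := pvAPass_mono hbs hs h edges
    rw [pvAPass_eq_of_nofire hb] at this
    exact this

-- ---- B-side: the batch set-closure ----
def pvBStepE (e : Int × Int) (S0 : List Int) : List Int :=
  if e.2 ∈ (if e.1 ∈ S0 ∧ e.2 ∉ S0 then S0 ++ [e.2] else S0) ∧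
      e.1 ∉ (if e.1 ∈ S0 ∧ e.2 ∉ S0 then S0 ++ [e.2] else S0) then
    (if e.1 ∈ S0 ∧ e.2 ∉ S0 then S0 ++ [e.2] else S0) ++ [e.1]
  else (if e.1 ∈ S0 ∧ e.2 ∉ S0 then S0 ++ [e.2] else S0)

theorem pvBRound_eq (batch : List (Int × Int)) (S : List Int) :
    pvBRound batch S = batch.foldl (fun S0 e => pvBStepE e S0) S := rfl

theorem pv_nodup_app {S : List Int} {x : Int} (h : S.Nodup) (hx : x ∉ S) :
    (S ++ [x]).Nodup := by
  rw [List.nodup_append_comm]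
  exact List.nodup_cons.mpr ⟨hx, h⟩

theorem pvBStepE_prefix (e : Int × Int) (S0 : List Int) : S0 <+: pvBStepE e S0 := by
  unfold pvBStepE
  by_cases h1 : e.1 ∈ S0 ∧ e.2 ∉ S0
  · rw [if_pos h1]
    refine List.IsPrefix.trans (⟨[e.2], rfl⟩ : S0 <+: S0 ++ [e.2]) ?_
    split
    · exact ⟨[e.1], rfl⟩
    · exact List.prefix_rfl
  · rw [if_neg h1]
    split
    · exact ⟨[e.1], rfl⟩
    · exact List.prefix_rfl

theorem pvBStepE_nodup {e : Int × Int} {S0 : List Int} (h : S0.Nodup) :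
    (pvBStepE e S0).Nodup := by
  unfold pvBStepE
  by_cases h1 : e.1 ∈ S0 ∧ e.2 ∉ S0
  · rw [if_pos h1]
    split <;> rename_i h2
    · exact pv_nodup_app (pv_nodup_app h h1.2) h2.2
    · exact pv_nodup_app h h1.2
  · rw [if_neg h1]
    split <;> rename_i h2
    · exact pv_nodup_app h h2.2
    · exact h

theorem pvBStepE_subset {e : Int × Int} {S0 N : List Int} (h : S0 ⊆ N)
    (h1 : e.1 ∈ N) (h2 : e.2 ∈ N) : pvBStepE e S0 ⊆ N := by
  unfold pvBStepE
  have happ : ∀ (L : List Int) (x : Int), L ⊆ N → x ∈ N → L ++ [x] ⊆ N := by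
    intro L x hL hx a ha
    simp only [List.mem_append, List.mem_singleton] at ha
    rcases ha with ha | ha
    · exact hL ha
    · exact ha ▸ hx
  by_cases hc1 : e.1 ∈ S0 ∧ e.2 ∉ S0
  · rw [if_pos hc1]
    split
    · exact happ _ _ (happ _ _ h h2) h1
    · exact happ _ _ h h2
  · rw [if_neg hc1]
    split
    · exact happ _ _ h h1
    · exact h

theorem pvBStepE_sound {Q : Int → Prop} {e : Int × Int} {S0 : List Int}
    (hS : ∀ x ∈ S0, Q x) (h12 : Q e.1 → Q e.2) (h21 : Q e.2 → Q e.1) :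
    ∀ x ∈ pvBStepE e S0, Q x := by
  unfold pvBStepE
  by_cases hc1 : e.1 ∈ S0 ∧ e.2 ∉ S0
  · rw [if_pos hc1]
    have hS1 : ∀ x ∈ S0 ++ [e.2], Q x := by
      intro x hx
      simp only [List.mem_append, List.mem_singleton] at hx
      rcases hx with hx | hx
      · exact hS x hx
      · exact hx ▸ h12 (hS _ hc1.1)
    split <;> rename_i hc2
    · intro x hx
      simp only [List.mem_append, List.mem_singleton] at hx
      rcases hx with (hx | hx) | hx
      · exact hS x hx
      · exact hx ▸ h12 (hS _ hc1.1)
      · exact hx ▸ h21 (hS1 _ hc2.1)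
    · exact hS1
  · rw [if_neg hc1]
    split <;> rename_i hc2
    · intro x hx
      simp only [List.mem_append, List.mem_singleton] at hx
      rcases hx with hx | hx
      · exact hS x hx
      · exact hx ▸ h21 (hS _ hc2.1)
    · exact hS

theorem pvBRound_prefix (batch : List (Int × Int)) :
    ∀ S : List Int, S <+: pvBRound batch S := by
  induction batch with
  | nil => intro S; exact List.prefix_rfl
  | cons e batch ih =>
    intro S
    rw [pvBRound_eq] at *
    simp only [List.foldl_cons]
    exact (pvBStepE_prefix e S).trans (ih (pvBStepE e S))

theorem pvBRound_nodup {batch : List (Int × Int)} :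
    ∀ {S : List Int}, S.Nodup → (pvBRound batch S).Nodup := by
  induction batch with
  | nil => intro S h; exact h
  | cons e batch ih =>
    intro S h
    rw [pvBRound_eq] at *
    exact ih (pvBStepE_nodup h)

theorem pvBRound_subset {batch : List (Int × Int)} {N : List Int}
    (hb : ∀ e ∈ batch, e.1 ∈ N ∧ e.2 ∈ N) :
    ∀ {S : List Int}, S ⊆ N → pvBRound batch S ⊆ N := by
  induction batch with
  | nil => intro S h; exact h
  | cons e batch ih =>
    intro S h
    rw [pvBRound_eq] at *
    have he := hb e List.mem_cons_self
    exact ih (fun e' he' => hb e' (List.mem_cons_of_mem _ he'))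
      (pvBStepE_subset h he.1 he.2)

theorem pvBRound_sound {Q : Int → Prop} {batch : List (Int × Int)}
    (hcl : ∀ e ∈ batch, (Q e.1 → Q e.2) ∧ (Q e.2 → Q e.1)) :
    ∀ {S : List Int}, (∀ x ∈ S, Q x) → ∀ x ∈ pvBRound batch S, Q x := by
  induction batch with
  | nil => intro S h; exact h
  | cons e batch ih =>
    intro S h
    rw [pvBRound_eq] at *
    have he := hcl e List.mem_cons_self
    exact ih (fun e' he' => hcl e' (List.mem_cons_of_mem _ he'))
      (pvBStepE_sound h he.1 he.2)

theorem pvBRound_fix_closed {batch : List (Int × Int)} :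
    ∀ {S : List Int}, pvBRound batch S = S →
      ∀ e ∈ batch, (e.1 ∈ S → e.2 ∈ S) ∧ (e.2 ∈ S → e.1 ∈ S) := by
  induction batch with
  | nil => intro S _ e he; cases he
  | cons e batch ih =>
    intro S hfix e' he'
    rw [pvBRound_eq] at hfix
    simp only [List.foldl_cons] at hfix
    have hpre1 : S <+: pvBStepE e S := pvBStepE_prefix e S
    have hpre2 : pvBStepE e S <+: S := by
      have hh := pvBRound_prefix batch (pvBStepE e S)
      rw [pvBRound_eq] at hh
      rw [hfix] at hh
      exact hh
    have hstep : pvBStepE e S = S := hpre2.eq_of_length_le hpre1.length_le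
    have hrest : pvBRound batch S = S := by
      rw [pvBRound_eq, ← hstep, hfix, hstep]
    rcases List.mem_cons.mp he' with hh | hh
    · subst hh
      unfold pvBStepE at hstep
      constructor
      · intro h1
        by_contra h2
        rw [if_pos (show e'.1 ∈ S ∧ e'.2 ∉ S from ⟨h1, h2⟩)] at hstep
        split at hstep <;>
          (have hl := congrArg List.length hstep; simp at hl)
      · intro h2
        by_contra h1
        have hc1 : ¬(e'.1 ∈ S ∧ e'.2 ∉ S) := fun hhh => h1 hhh.1
        rw [if_neg hc1, if_pos (show e'.2 ∈ S ∧ e'.1 ∉ S from ⟨h2, h1⟩)] at hstep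
        have hl := congrArg List.length hstep
        simp at hl
    · exact ih hrest e' hh

theorem pvBRound_noadd {batch : List (Int × Int)}
    (hb : ∀ e ∈ batch, e.1 ∈ N ∧ e.2 ∈ N) {S : List Int} (hNS : N ⊆ S)
    : pvBRound batch S = S := by
  induction batch with
  | nil => rfl
  | cons e batch ih =>
    rw [pvBRound_eq] at *
    simp only [List.foldl_cons]
    have he := hb e List.mem_cons_self
    have hstep : pvBStepE e S = S := by
      unfold pvBStepE
      rw [if_neg (show ¬(e.1 ∈ S ∧ e.2 ∉ S) from fun hh => hh.2 (hNS he.2))]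
      rw [if_neg (show ¬(e.2 ∈ S ∧ e.1 ∉ S) from fun hh => hh.2 (hNS he.1))]
    rw [hstep]
    exact ih (fun e' he' => hb e' (List.mem_cons_of_mem _ he'))

theorem pv_subset_of_nodup_length {S N : List Int} (hS : S.Nodup) (hN : N.Nodup)
    (hsub : S ⊆ N) (hlen : N.length ≤ S.length) : N ⊆ S := by
  intro x hx
  have h1 : S.toFinset ⊆ N.toFinset := by
    intro a ha
    simp only [List.mem_toFinset] at ha ⊢
    exact hsub ha
  have hcard : N.toFinset.card ≤ S.toFinset.card := by
    rw [List.toFinset_card_of_nodup hS, List.toFinset_card_of_nodup hN]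
    exact hlen
  have := Finset.eq_of_subset_of_card_le h1 hcard
  rw [← List.mem_toFinset, ← this, List.mem_toFinset] at hx
  exact hx

theorem pvBClosure_fix {batch : List (Int × Int)} {nodes : List Int}
    (hnod : nodes.Nodup) (hb : ∀ e ∈ batch, e.1 ∈ nodes ∧ e.2 ∈ nodes) :
    ∀ (fuel : Nat) (S : List Int), S.Nodup → S ⊆ nodes →
      nodes.length ≤ S.length + fuel →
      pvBRound batch (pvBClosure batch fuel S) = pvBClosure batch fuel S := by
  intro fuel
  induction fuel with
  | zero =>
    intro S hSn hsub hlen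
    simp only [pvBClosure]
    exact pvBRound_noadd hb (pv_subset_of_nodup_length hSn hnod hsub (by omega))
  | succ fuel ih =>
    intro S hSn hsub hlen
    unfold pvBClosure
    by_cases hlen2 : (pvBRound batch S).length = S.length
    · rw [if_pos hlen2]
      have hfix : pvBRound batch S = S :=
        ((pvBRound_prefix batch S).eq_of_length_le (by omega)).symm
      rw [hfix]
      exact hfix
    · rw [if_neg hlen2]
      have hgrow : S.length + 1 ≤ (pvBRound batch S).length := by
        have := (pvBRound_prefix batch S).length_le
        omega
      exact ih (pvBRound batch S) (pvBRound_nodup hSn) (pvBRound_subset hb hsub)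
        (by omega)

theorem pvBClosure_prefix (batch : List (Int × Int)) :
    ∀ (fuel : Nat) (S : List Int), S <+: pvBClosure batch fuel S := by
  intro fuel
  induction fuel with
  | zero => intro S; exact List.prefix_rfl
  | succ fuel ih =>
    intro S
    unfold pvBClosure
    split
    · exact pvBRound_prefix batch S
    · exact (pvBRound_prefix batch S).trans (ih _)

theorem pvBClosure_subset {batch : List (Int × Int)} {N : List Int}
    (hb : ∀ e ∈ batch, e.1 ∈ N ∧ e.2 ∈ N) :
    ∀ {fuel : Nat} {S : List Int}, S ⊆ N → pvBClosure batch fuel S ⊆ N := by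
  intro fuel
  induction fuel with
  | zero => intro S h; exact h
  | succ fuel ih =>
    intro S h
    unfold pvBClosure
    split
    · exact pvBRound_subset hb h
    · exact ih (pvBRound_subset hb h)

theorem pvBClosure_sound {Q : Int → Prop} {batch : List (Int × Int)}
    (hcl : ∀ e ∈ batch, (Q e.1 → Q e.2) ∧ (Q e.2 → Q e.1)) :
    ∀ {fuel : Nat} {S : List Int}, (∀ x ∈ S, Q x) → ∀ x ∈ pvBClosure batch fuel S, Q x := by
  intro fuel
  induction fuel with
  | zero => intro S h; exact h
  | succ fuel ih =>
    intro S h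
    unfold pvBClosure
    split
    · exact pvBRound_sound hcl h
    · exact ih (pvBRound_sound hcl h)

-- nodes of a batch
def pvBNStep (acc : List Int) (e : Int × Int) : List Int :=
  if e.2 ∈ (if e.1 ∈ acc then acc else acc ++ [e.1]) then
    (if e.1 ∈ acc then acc else acc ++ [e.1])
  else (if e.1 ∈ acc then acc else acc ++ [e.1]) ++ [e.2]

theorem pvBNodes_eq (batch : List (Int × Int)) :
    pvBNodes batch = batch.foldl pvBNStep [] := rfl

theorem pvBNStep_sup (acc : List Int) (e : Int × Int) : acc ⊆ pvBNStep acc e := by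
  unfold pvBNStep
  intro x hx
  by_cases h1 : e.1 ∈ acc
  · rw [if_pos h1]
    split
    · exact hx
    · exact List.mem_append_left _ hx
  · rw [if_neg h1]
    split
    · exact List.mem_append_left _ hx
    · exact List.mem_append_left _ (List.mem_append_left _ hx)

theorem pvBNStep_nodup {acc : List Int} (h : acc.Nodup) (e : Int × Int) :
    (pvBNStep acc e).Nodup := by
  unfold pvBNStep
  by_cases h1 : e.1 ∈ acc
  · rw [if_pos h1]
    split
    · exact h
    · rename_i hne; exact pv_nodup_app h hne
  · rw [if_neg h1]
    split
    · exact pv_nodup_app h h1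
    · rename_i hne; exact pv_nodup_app (pv_nodup_app h h1) hne

theorem pvBNStep_mem (acc : List Int) (e : Int × Int) :
    e.1 ∈ pvBNStep acc e ∧ e.2 ∈ pvBNStep acc e := by
  unfold pvBNStep
  by_cases h1 : e.1 ∈ acc
  · rw [if_pos h1]
    constructor
    · split
      · exact h1
      · exact List.mem_append_left _ h1
    · split
      · assumption
      · simp
  · rw [if_neg h1]
    constructor
    · split
      · simp
      · exact List.mem_append_left _ (by simp)
    · split
      · assumption
      · simp

theorem pvBNStep_src {acc : List Int} {e : Int × Int} {x : Int}
    (h : x ∈ pvBNStep acc e) : x ∈ acc ∨ x = e.1 ∨ x = e.2 := by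
  unfold pvBNStep at h
  by_cases h1 : e.1 ∈ acc
  · rw [if_pos h1] at h
    split at h
    · exact Or.inl h
    · simp only [List.mem_append, List.mem_singleton] at h
      exact h.imp_right (fun hh => Or.inr hh)
  · rw [if_neg h1] at h
    split at h
    · simp only [List.mem_append, List.mem_singleton] at h
      exact h.imp_right (fun hh => Or.inl hh)
    · simp only [List.mem_append, List.mem_singleton] at h
      rcases h with (h | h) | h
      · exact Or.inl h
      · exact Or.inr (Or.inl h)
      · exact Or.inr (Or.inr h)

theorem pvBNFold_mono (l : List (Int × Int)) :
    ∀ (acc : List Int) (x : Int), x ∈ acc → x ∈ l.foldl pvBNStep acc := by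
  induction l with
  | nil => intro acc x hx; exact hx
  | cons f l ihl =>
    intro acc x hx
    simp only [List.foldl_cons]
    exact ihl _ x (pvBNStep_sup acc f hx)

theorem pvBNodes_spec (batch : List (Int × Int)) :
    (pvBNodes batch).Nodup ∧
      (∀ e ∈ batch, e.1 ∈ pvBNodes batch ∧ e.2 ∈ pvBNodes batch) ∧
      (∀ x ∈ pvBNodes batch, ∃ e ∈ batch, x = e.1 ∨ x = e.2) := by
  rw [pvBNodes_eq]
  suffices hgen : ∀ (l : List (Int × Int)) (acc : List Int), acc.Nodup →
      (l.foldl pvBNStep acc).Nodup ∧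
      (∀ e ∈ l, e.1 ∈ l.foldl pvBNStep acc ∧ e.2 ∈ l.foldl pvBNStep acc) ∧
      (∀ x ∈ l.foldl pvBNStep acc, x ∈ acc ∨ ∃ e ∈ l, x = e.1 ∨ x = e.2) by
    obtain ⟨h1, h2, h3⟩ := hgen batch [] (by simp)
    refine ⟨h1, h2, ?_⟩
    intro x hx
    rcases h3 x hx with h | h
    · cases h
    · exact h
  intro l
  induction l with
  | nil => intro acc h; exact ⟨h, by simp, fun x hx => Or.inl hx⟩
  | cons e l ih =>
    intro acc hacc
    simp only [List.foldl_cons]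
    obtain ⟨ih1, ih2, ih3⟩ := ih (pvBNStep acc e) (pvBNStep_nodup hacc e)
    refine ⟨ih1, ?_, ?_⟩
    · intro e' he'
      rcases List.mem_cons.mp he' with hh | hh
      · subst hh
        exact ⟨pvBNFold_mono l _ _ (pvBNStep_mem acc e').1,
          pvBNFold_mono l _ _ (pvBNStep_mem acc e').2⟩
      · exact ih2 e' hh
    · intro x hx
      rcases ih3 x hx with h | h
      · rcases pvBNStep_src h with h' | h'
        · exact Or.inl h'
        · exact Or.inr ⟨e, List.mem_cons_self, h'⟩
      · obtain ⟨f, hf, hor⟩ := h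
        exact Or.inr ⟨f, List.mem_cons_of_mem _ hf, hor⟩

-- ---- B-side: per-src batch processing ----
def pvUStep (t src : Int) (s2 : PVState) (x : Int) : PVState :=
  if pvCellOK s2 src x && pvTlt t (pvGetc s2 src x) then pvSetc s2 src x (some t) else s2

theorem pvBProc_eq (t : Int) (nodes : List Int) (batch : List (Int × Int)) (s : PVState)
    (src : Int) :
    pvBProc t nodes batch s src =
      (pvBClosure batch nodes.length
        (nodes.filter (fun x => pvVle (pvGetc s src x) t))).foldl (pvUStep t src) s := rfl

theorem pvUStep_getc (t src : Int) (s2 : PVState) (x r c : Int) :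
    pvGetc (pvUStep t src s2 x) r c =
      if (pvCellOK s2 src x && pvTlt t (pvGetc s2 src x)) = true ∧ r = src ∧ c = x then some t
      else pvGetc s2 r c := by
  unfold pvUStep
  by_cases hc : (pvCellOK s2 src x && pvTlt t (pvGetc s2 src x)) = true
  · rw [if_pos hc]
    by_cases hrc : r = src ∧ c = x
    · have hcond : _ ∧ r = src ∧ c = x := ⟨hc, hrc.1, hrc.2⟩
      rw [if_pos hcond, hrc.1, hrc.2]
      exact pvGetc_setc_self (Bool.and_eq_true .. ▸ hc).1 _
    · rw [if_neg (by tauto)]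
      exact pvGetc_setc_ne ((Bool.and_eq_true ..).mp hc).1 _ hrc
  · rw [if_neg hc, if_neg (by tauto)]

theorem pvUStep_shape {n : Int} {s2 : PVState} (h : pvShape n s2) (t src x : Int) :
    pvShape n (pvUStep t src s2 x) := by
  unfold pvUStep
  split
  · exact pvShape_setc h _ _ _
  · exact h

theorem pvUStep_le (t src : Int) (s2 : PVState) (x : Int) :
    pvSLE (pvUStep t src s2 x) s2 := by
  intro r c
  rw [pvUStep_getc]
  split_ifs with h
  · obtain ⟨hc, hr, hx⟩ := h
    rw [hr, hx]
    exact pvLeV_some_of_tlt ((Bool.and_eq_true ..).mp hc).2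
  · exact pvLeV_refl _

theorem pvUFold_shape {n : Int} (t src : Int) (S : List Int) :
    ∀ {s : PVState}, pvShape n s → pvShape n (S.foldl (pvUStep t src) s) := by
  induction S with
  | nil => intro s h; exact h
  | cons x S ih => intro s h; exact ih (pvUStep_shape h t src x)

theorem pvUFold_le (t src : Int) (S : List Int) :
    ∀ s : PVState, pvSLE (S.foldl (pvUStep t src) s) s := by
  induction S with
  | nil => intro s; exact fun r c => pvLeV_refl _
  | cons x S ih =>
    intro s
    exact fun r c => pvLeV_trans (ih (pvUStep t src s x) r c) (pvUStep_le t src s x r c)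

theorem pvUFold_writes (t src : Int) (S : List Int) :
    ∀ (s : PVState) (r c : Int),
      pvGetc (S.foldl (pvUStep t src) s) r c = pvGetc s r c ∨
        (r = src ∧ c ∈ S ∧ pvGetc (S.foldl (pvUStep t src) s) r c = some t) := by
  induction S with
  | nil => intro s r c; exact Or.inl rfl
  | cons x S ih =>
    intro s r c
    simp only [List.foldl_cons]
    rcases ih (pvUStep t src s x) r c with h | h
    · rw [h, pvUStep_getc]
      split_ifs with hc
      · exact Or.inr ⟨hc.2.1, by simp [hc.2.2], rfl⟩
      · exact Or.inl rfl
    · exact Or.inr ⟨h.1, List.mem_cons_of_mem _ h.2.1, h.2.2⟩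

theorem pvUFold_reach {n : Int} (t src : Int) (S : List Int)
    (hsrc : 0 ≤ src ∧ src < n) :
    ∀ {s : PVState}, pvShape n s → ∀ x ∈ S, 0 ≤ x ∧ x < n →
      pvVle (pvGetc (S.foldl (pvUStep t src) s) src x) t = true := by
  induction S with
  | nil => intro s _ x hx; cases hx
  | cons y S ih =>
    intro s hsh x hx hxr
    simp only [List.foldl_cons]
    rcases List.mem_cons.mp hx with hh | hh
    · subst hh
      have hOK : pvCellOK s src x = true :=
        (pvCellOK_shape hsh src x).mpr ⟨hsrc.1, hsrc.2, hxr.1, hxr.2⟩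
      have hstep : pvVle (pvGetc (pvUStep t src s x) src x) t = true := by
        rw [pvUStep_getc]
        by_cases hc : (pvCellOK s src x && pvTlt t (pvGetc s src x)) = true
        · rw [if_pos ⟨hc, rfl, rfl⟩]
          simp [pvVle]
        · rw [if_neg (by tauto)]
          have : pvTlt t (pvGetc s src x) = false := by
            rcases Bool.eq_false_or_eq_true (pvTlt t (pvGetc s src x)) with hb | hb
            · exact absurd (by rw [hOK, hb]; rfl) hc
            · exact hb
          rw [pvTlt_eq_not_vle] at this
          simpa using this
      exact pvVle_of_leV (pvUFold_le t src S (pvUStep t src s x) src x) hstep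
    · exact ih (pvUStep_shape hsh t src y) x hh hxr

theorem pvUFold_sound {R : PVState} {t src : Int} {S : List Int}
    (hQ : ∀ x ∈ S, pvLeV (pvGetc R src x) (some t)) :
    ∀ {s : PVState}, pvSLE R s → pvSLE R (S.foldl (pvUStep t src) s) := by
  induction S with
  | nil => intro s h; exact h
  | cons x S ih =>
    intro s h
    simp only [List.foldl_cons]
    refine ih (fun y hy => hQ y (List.mem_cons_of_mem _ hy)) ?_
    intro r c
    rw [pvUStep_getc]
    split_ifs with hc
    · rw [hc.2.1, hc.2.2]
      exact hQ x List.mem_cons_self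
    · exact h r c

-- pvBProc-level lemmas
theorem pvBProc_shape {n : Int} {s : PVState} (h : pvShape n s) (t : Int)
    (nodes : List Int) (batch : List (Int × Int)) (src : Int) :
    pvShape n (pvBProc t nodes batch s src) := by
  rw [pvBProc_eq]
  exact pvUFold_shape t src _ h

theorem pvBProc_le (t : Int) (nodes : List Int) (batch : List (Int × Int)) (s : PVState)
    (src : Int) : pvSLE (pvBProc t nodes batch s src) s := by
  rw [pvBProc_eq]
  exact pvUFold_le t src _ s

theorem pvBProc_writes (t : Int) (nodes : List Int) (batch : List (Int × Int)) (s : PVState)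
    (src r c : Int) :
    pvGetc (pvBProc t nodes batch s src) r c = pvGetc s r c ∨
      (r = src ∧ pvGetc (pvBProc t nodes batch s src) r c = some t) := by
  rw [pvBProc_eq]
  rcases pvUFold_writes t src _ s r c with h | h
  · exact Or.inl h
  · exact Or.inr ⟨h.1, h.2.2⟩

theorem pvBProc_other {t : Int} {nodes : List Int} {batch : List (Int × Int)} {s : PVState}
    {src r : Int} (hr : ¬ r = src) (c : Int) :
    pvGetc (pvBProc t nodes batch s src) r c = pvGetc s r c := by
  rcases pvBProc_writes t nodes batch s src r c with h | h
  · exact h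
  · exact absurd h.1 hr

theorem pvBProc_closed {n : Int} {s : PVState} (hsh : pvShape n s) {t : Int}
    {nodes : List Int} {batch : List (Int × Int)} {src : Int}
    (hsrc : 0 ≤ src ∧ src < n) (hrangeN : ∀ x ∈ nodes, 0 ≤ x ∧ x < n)
    (hnod : nodes.Nodup) (hend : ∀ e ∈ batch, e.1 ∈ nodes ∧ e.2 ∈ nodes) :
    ∀ e ∈ batch,
      (pvVle (pvGetc (pvBProc t nodes batch s src) src e.1) t = true →
        pvVle (pvGetc (pvBProc t nodes batch s src) src e.2) t = true) ∧
      (pvVle (pvGetc (pvBProc t nodes batch s src) src e.2) t = true →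
        pvVle (pvGetc (pvBProc t nodes batch s src) src e.1) t = true) := by
  intro e he
  have hfil : (nodes.filter (fun x => pvVle (pvGetc s src x) t)).Nodup :=
    hnod.filter _
  have hfix : pvBRound batch
      (pvBClosure batch nodes.length (nodes.filter (fun x => pvVle (pvGetc s src x) t))) =
      pvBClosure batch nodes.length (nodes.filter (fun x => pvVle (pvGetc s src x) t)) :=
    pvBClosure_fix hnod hend nodes.length _ hfil (fun x hx => (List.mem_filter.mp hx).1)
      (by have := List.length_filter_le (fun x => pvVle (pvGetc s src x) t) nodes; omega)
  have hcl := pvBRound_fix_closed hfix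
  have hCrange : ∀ x ∈ pvBClosure batch nodes.length
      (nodes.filter (fun x => pvVle (pvGetc s src x) t)), 0 ≤ x ∧ x < n := by
    intro x hx
    exact hrangeN x (pvBClosure_subset hend (fun y hy => (List.mem_filter.mp hy).1) hx)
  have hkey : ∀ u, u ∈ nodes →
      pvVle (pvGetc (pvBProc t nodes batch s src) src u) t = true →
        u ∈ pvBClosure batch nodes.length
          (nodes.filter (fun x => pvVle (pvGetc s src x) t)) := by
    intro u hu hvle
    rw [pvBProc_eq] at hvle
    rcases pvUFold_writes t src _ s src u with h | h
    · rw [h] at hvle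
      exact (pvBClosure_prefix batch nodes.length _).subset
        (List.mem_filter.mpr ⟨hu, hvle⟩)
    · exact h.2.1
  have hreach : ∀ u, u ∈ pvBClosure batch nodes.length
      (nodes.filter (fun x => pvVle (pvGetc s src x) t)) →
      pvVle (pvGetc (pvBProc t nodes batch s src) src u) t = true := by
    intro u hu
    rw [pvBProc_eq]
    exact pvUFold_reach t src _ hsrc hsh u hu (hCrange u hu)
  constructor
  · intro h1
    exact hreach _ ((hcl e he).1 (hkey _ (hend e he).1 h1))
  · intro h2
    exact hreach _ ((hcl e he).2 (hkey _ (hend e he).2 h2))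

theorem pvBProc_sound {R : PVState} {s : PVState} {t : Int}
    {nodes : List Int} {batch : List (Int × Int)} {src : Int}
    (hSLE : pvSLE R s)
    (himp : ∀ e ∈ batch,
      (pvVle (pvGetc R src e.1) t = true → pvVle (pvGetc R src e.2) t = true) ∧
      (pvVle (pvGetc R src e.2) t = true → pvVle (pvGetc R src e.1) t = true)) :
    pvSLE R (pvBProc t nodes batch s src) := by
  rw [pvBProc_eq]
  refine pvUFold_sound ?_ hSLE
  intro x hx
  refine pvLeV_of_vle ?_
  refine pvBClosure_sound (Q := fun y => pvVle (pvGetc R src y) t = true) himp ?_ x hx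
  intro y hy
  exact pvVle_of_leV (hSLE src y) (List.mem_filter.mp hy).2

-- fold over all srcs
theorem pvBSF_shape {n : Int} (t : Int) (nodes : List Int) (batch : List (Int × Int))
    (L : List Int) :
    ∀ {s : PVState}, pvShape n s →
      pvShape n (L.foldl (fun st src => pvBProc t nodes batch st src) s) := by
  induction L with
  | nil => intro s h; exact h
  | cons a L ih => intro s h; exact ih (pvBProc_shape h t nodes batch a)

theorem pvBSF_le (t : Int) (nodes : List Int) (batch : List (Int × Int)) (L : List Int) :
    ∀ s : PVState, pvSLE (L.foldl (fun st src => pvBProc t nodes batch st src) s) s := by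
  induction L with
  | nil => intro s; exact fun r c => pvLeV_refl _
  | cons a L ih =>
    intro s
    exact fun r c => pvLeV_trans (ih (pvBProc t nodes batch s a) r c)
      (pvBProc_le t nodes batch s a r c)

theorem pvBSF_writes (t : Int) (nodes : List Int) (batch : List (Int × Int)) (L : List Int) :
    ∀ (s : PVState) (r c : Int),
      pvGetc (L.foldl (fun st src => pvBProc t nodes batch st src) s) r c = pvGetc s r c ∨
        pvGetc (L.foldl (fun st src => pvBProc t nodes batch st src) s) r c = some t := by
  induction L with
  | nil => intro s r c; exact Or.inl rfl
  | cons a L ih =>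
    intro s r c
    simp only [List.foldl_cons]
    rcases ih (pvBProc t nodes batch s a) r c with h | h
    · rw [h]
      rcases pvBProc_writes t nodes batch s a r c with h' | h'
      · exact Or.inl h'
      · exact Or.inr h'.2
    · exact Or.inr h

theorem pvBSF_untouched {t : Int} {nodes : List Int} {batch : List (Int × Int)}
    {L : List Int} {src : Int} (hL : src ∉ L) :
    ∀ (s : PVState) (c : Int),
      pvGetc (L.foldl (fun st src => pvBProc t nodes batch st src) s) src c =
        pvGetc s src c := by
  induction L with
  | nil => intro s c; rfl
  | cons a L ih =>
    intro s c
    simp only [List.foldl_cons]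
    have hne : ¬ src = a := fun hh => hL (hh ▸ List.mem_cons_self)
    rw [ih (fun hh => hL (List.mem_cons_of_mem _ hh)) _ c, pvBProc_other hne c]

theorem pvBSF_sound {R : PVState} {t : Int} {nodes : List Int}
    {batch : List (Int × Int)} (L : List Int)
    (himp : ∀ src ∈ L, ∀ e ∈ batch,
      (pvVle (pvGetc R src e.1) t = true → pvVle (pvGetc R src e.2) t = true) ∧
      (pvVle (pvGetc R src e.2) t = true → pvVle (pvGetc R src e.1) t = true)) :
    ∀ {s : PVState}, pvSLE R s →
      pvSLE R (L.foldl (fun st src => pvBProc t nodes batch st src) s) := by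
  induction L with
  | nil => intro s h; exact h
  | cons a L ih =>
    intro s h
    simp only [List.foldl_cons]
    exact ih (fun src hs => himp src (List.mem_cons_of_mem _ hs))
      (pvBProc_sound h (himp a List.mem_cons_self))

theorem pvBSF_closed {n : Int} {t : Int} {nodes : List Int} {batch : List (Int × Int)}
    (hrangeN : ∀ x ∈ nodes, 0 ≤ x ∧ x < n) (hnod : nodes.Nodup)
    (hend : ∀ e ∈ batch, e.1 ∈ nodes ∧ e.2 ∈ nodes) :
    ∀ (L : List Int), L.Nodup → (∀ src ∈ L, 0 ≤ src ∧ src < n) →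
      ∀ {s : PVState}, pvShape n s →
      ∀ src ∈ L, ∀ e ∈ batch,
        (pvVle (pvGetc (L.foldl (fun st src => pvBProc t nodes batch st src) s) src e.1) t
            = true →
          pvVle (pvGetc (L.foldl (fun st src => pvBProc t nodes batch st src) s) src e.2) t
            = true) ∧
        (pvVle (pvGetc (L.foldl (fun st src => pvBProc t nodes batch st src) s) src e.2) t
            = true →
          pvVle (pvGetc (L.foldl (fun st src => pvBProc t nodes batch st src) s) src e.1) t
            = true) := by
  intro L
  induction L with
  | nil => intro _ _ s _ src hsrc; cases hsrc
  | cons a L ih =>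
    intro hLn hLr s hsh src hsrc e he
    simp only [List.foldl_cons]
    rcases List.mem_cons.mp hsrc with hh | hh
    · subst hh
      have hnotin : src ∉ L := (List.nodup_cons.mp hLn).1
      have hrow := pvBSF_untouched (t := t) (nodes := nodes) (batch := batch) hnotin
        (pvBProc t nodes batch s src)
      have hbase := pvBProc_closed (t := t) hsh (hLr src List.mem_cons_self) hrangeN hnod hend e he
      rw [hrow e.1, hrow e.2]
      exact hbase
    · exact ih (List.nodup_cons.mp hLn).2 (fun x hx => hLr x (List.mem_cons_of_mem _ hx))
        (pvBProc_shape hsh t nodes batch a) src hh e he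

-- ---- B-side: the outer sweep ----
theorem pvBatch_mem {e : Int × Int × Int} {rest : List (Int × Int × Int)} {p : Int × Int}
    (hp : p ∈ ((e :: rest).takeWhile (fun x => x.2.2 == e.2.2)).map (fun x => (x.1, x.2.1))) :
    ∃ x ∈ e :: rest, x.2.2 = e.2.2 ∧ p = (x.1, x.2.1) := by
  obtain ⟨x, hx, hpx⟩ := List.mem_map.mp hp
  refine ⟨x, (List.takeWhile_sublist _).subset hx, ?_, hpx.symm⟩
  have := List.mem_takeWhile_imp hx
  simpa using this

theorem pvRemGt {e : Int × Int × Int} {rest : List (Int × Int × Int)}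
    (hs : (e :: rest).Pairwise (fun a b => a.2.2 ≤ b.2.2)) :
    ∀ y ∈ (e :: rest).dropWhile (fun x => x.2.2 == e.2.2), e.2.2 < y.2.2 := by
  intro y hy
  have hdw : (e :: rest).dropWhile (fun x => x.2.2 == e.2.2) =
      rest.dropWhile (fun x => x.2.2 == e.2.2) := by
    simp [List.dropWhile_cons]
  rw [hdw] at hy
  have hpw := List.pairwise_cons.mp hs
  cases hrem : rest.dropWhile (fun x => x.2.2 == e.2.2) with
  | nil => rw [hrem] at hy; cases hy
  | cons a l' =>
    rw [hrem] at hy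
    have h1 : rest.dropWhile (fun x => x.2.2 == e.2.2) ≠ [] := by rw [hrem]; simp
    have h2 := List.head_dropWhile_not (l := rest) (fun x => x.2.2 == e.2.2) h1
    have h3 : (rest.dropWhile (fun x => x.2.2 == e.2.2)).head h1 = a := by
      simp [hrem]
    rw [h3] at h2
    have hne : ¬ a.2.2 = e.2.2 := by simpa using h2
    have hax : e.2.2 ≤ a.2.2 :=
      hpw.1 a ((List.dropWhile_sublist _).subset (by rw [hrem]; exact List.mem_cons_self))
    have hpl : (a :: l').Pairwise (fun u v => u.2.2 ≤ v.2.2) :=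
      hrem ▸ hpw.2.sublist (List.dropWhile_sublist _)
    rcases List.mem_cons.mp hy with hh | hh
    · rw [hh]; omega
    · have := (List.pairwise_cons.mp hpl).1 y hh
      omega

theorem pvBLoop_shape {n : Int} : ∀ (edges : List (Int × Int × Int)) (s : PVState),
    pvShape n s → pvShape n (pvBLoop n edges s) := by
  intro edges s
  fun_induction pvBLoop n edges s with
  | case1 s => intro h; exact h
  | case2 s e rest t batch rem s1 ih =>
    intro h
    exact ih (pvBSF_shape t _ batch _ h)

theorem pvBLoop_le {n : Int} : ∀ (edges : List (Int × Int × Int)) (s : PVState),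
    pvSLE (pvBLoop n edges s) s := by
  intro edges s
  fun_induction pvBLoop n edges s with
  | case1 s => exact fun r c => pvLeV_refl _
  | case2 s e rest t batch rem s1 ih =>
    exact fun r c => pvLeV_trans (ih r c) (pvBSF_le t _ batch _ s r c)

theorem pvBLoop_pres {n : Int} (t0 : Int) : ∀ (edges : List (Int × Int × Int)) (s : PVState),
    (∀ x ∈ edges, t0 < x.2.2) → ∀ r c,
      pvVle (pvGetc (pvBLoop n edges s) r c) t0 = true →
        pvVle (pvGetc s r c) t0 = true := by
  intro edges s
  fun_induction pvBLoop n edges s with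
  | case1 s => intro _ r c h; exact h
  | case2 s e rest t batch rem s1 ih =>
    intro hgt r c h
    have hrem : ∀ x ∈ rem, t0 < x.2.2 := fun x hx =>
      hgt x ((List.dropWhile_sublist _).subset hx)
    have h1 := ih hrem r c h
    rcases pvBSF_writes t _ batch _ s r c with hw | hw
    · rw [hw] at h1; exact h1
    · rw [hw] at h1
      have ht0 : t0 < t := hgt e List.mem_cons_self
      simp only [pvVle, decide_eq_true_eq] at h1
      omega

theorem pvBLoop_sound {R : PVState} {n : Int} : ∀ (edges : List (Int × Int × Int)) (s : PVState),
    (∀ x ∈ edges, ∀ src : Int, 0 ≤ src → src < n →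
      (pvVle (pvGetc R src x.1) x.2.2 = true → pvVle (pvGetc R src x.2.1) x.2.2 = true) ∧
      (pvVle (pvGetc R src x.2.1) x.2.2 = true → pvVle (pvGetc R src x.1) x.2.2 = true)) →
    pvSLE R s → pvSLE R (pvBLoop n edges s) := by
  intro edges s
  fun_induction pvBLoop n edges s with
  | case1 s => intro _ h; exact h
  | case2 s e rest t batch rem s1 ih =>
    intro hR h
    refine ih (fun x hx => hR x ((List.dropWhile_sublist _).subset hx)) ?_
    refine pvBSF_sound _ ?_ h
    intro src hsrc p hp
    have hbounds : 0 ≤ src ∧ src < n := by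
      have := PySem.List.mem_pyRange_one.mp hsrc
      omega
    obtain ⟨x, hxmem, hxt, hpx⟩ := pvBatch_mem hp
    have hx := hR x hxmem src hbounds.1 hbounds.2
    have hxt' : x.2.2 = t := hxt
    rw [hpx, ← hxt']
    exact hx

theorem pvBLoop_closed {n : Int} : ∀ (edges : List (Int × Int × Int)) (s : PVState),
    edges.Pairwise (fun a b => a.2.2 ≤ b.2.2) → pvShape n s →
    (∀ x ∈ edges, (0 ≤ x.1 ∧ x.1 < n) ∧ (0 ≤ x.2.1 ∧ x.2.1 < n)) →
    ∀ x ∈ edges, ∀ src : Int, 0 ≤ src → src < n →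
      (pvVle (pvGetc (pvBLoop n edges s) src x.1) x.2.2 = true →
        pvVle (pvGetc (pvBLoop n edges s) src x.2.1) x.2.2 = true) ∧
      (pvVle (pvGetc (pvBLoop n edges s) src x.2.1) x.2.2 = true →
        pvVle (pvGetc (pvBLoop n edges s) src x.1) x.2.2 = true) := by
  intro edges s
  fun_induction pvBLoop n edges s with
  | case1 s => intro _ _ _ x hx; cases hx
  | case2 s e rest t batch rem s1 ih =>
    intro hsort hsh hrange x hx src hs0 hsn
    have hshape1 : pvShape n s1 := pvBSF_shape t _ batch _ hsh
    have hremgt : ∀ y ∈ rem, t < y.2.2 := pvRemGt hsort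
    have hsplit : x ∈ (e :: rest).takeWhile (fun z => z.2.2 == t) ∨ x ∈ rem := by
      have happ := List.takeWhile_append_dropWhile
        (p := fun z => z.2.2 == t) (l := e :: rest)
      rw [← happ] at hx
      exact List.mem_append.mp hx
    rcases hsplit with hcase | hcase
    · have hxt : x.2.2 = t := by simpa using List.mem_takeWhile_imp hcase
      have hpair : (x.1, x.2.1) ∈ batch :=
        List.mem_map_of_mem (f := fun z => (z.1, z.2.1)) hcase
      obtain ⟨hnodnodup, hnodmem, hnodsrc⟩ := pvBNodes_spec batch
      have hrangeN : ∀ y ∈ pvBNodes batch, 0 ≤ y ∧ y < n := by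
        intro y hy
        obtain ⟨p, hpb, hor⟩ := hnodsrc y hy
        obtain ⟨z, hzmem, hzt, hpz⟩ := pvBatch_mem hpb
        have hz := hrange z hzmem
        rcases hor with h' | h'
        · rw [h', hpz]; exact hz.1
        · rw [h', hpz]; exact hz.2
      have hclosed := pvBSF_closed (t := t) hrangeN hnodnodup hnodmem
        (PySem.List.pyRange 0 n 1) (PySem.List.nodup_pyRange_one 0 n)
        (fun src' hs' => PySem.List.mem_pyRange_one.mp hs')
        hsh src (PySem.List.mem_pyRange_one.mpr ⟨hs0, hsn⟩) (x.1, x.2.1) hpair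
      have hle := pvBLoop_le (n := n) rem s1
      constructor
      · intro h1
        have h2 := pvBLoop_pres (n := n) t rem s1 hremgt src x.1 (hxt ▸ h1)
        have h3 := hclosed.1 h2
        exact hxt ▸ pvVle_of_leV (hle src x.2.1) h3
      · intro h1
        have h2 := pvBLoop_pres (n := n) t rem s1 hremgt src x.2.1 (hxt ▸ h1)
        have h3 := hclosed.2 h2
        exact hxt ▸ pvVle_of_leV (hle src x.1) h3
    · exact ih (hsort.sublist (List.dropWhile_sublist _)) hshape1
        (fun y hy => hrange y ((List.dropWhile_sublist _).subset hy)) x hcase src hs0 hsn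

-- ---- glue: both loops compute the same matrix ----
theorem pvInit_shape (n : Int) : pvShape n (pvInit n) := by
  unfold pvInit
  have hbase : pvShape n (List.replicate n.toNat (List.replicate n.toNat (none : Option Int))) := by
    constructor
    · simp
    · intro row hrow
      rw [List.eq_of_mem_replicate hrow]
      simp
  suffices h : ∀ (L : List Int) (s : PVState), pvShape n s →
      pvShape n (L.foldl (fun s u => pvSetc s u u (some 0)) s) from h _ _ hbase
  intro L
  induction L with
  | nil => intro s h; exact h
  | cons a L ih => intro s h; exact ih _ (pvShape_setc h _ _ _)

theorem pvImp_of_nofire {n : Int} {s : PVState} (hsh : pvShape n s) {src a b t : Int}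
    (hc : pvACond src a b t s = false) (hb : 0 ≤ src ∧ src < n ∧ 0 ≤ b ∧ b < n) :
    pvVle (pvGetc s src a) t = true → pvVle (pvGetc s src b) t = true := by
  intro hv
  have hOK : pvCellOK s src b = true :=
    (pvCellOK_shape hsh src b).mpr ⟨hb.1, hb.2.1, hb.2.2.1, hb.2.2.2⟩
  by_contra hnb
  have hnb' : pvVle (pvGetc s src b) t = false := by
    rcases Bool.eq_false_or_eq_true (pvVle (pvGetc s src b) t) with h | h
    · exact absurd h hnb
    · exact h
  have htlt : pvTlt t (pvGetc s src b) = true := by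
    rw [pvTlt_eq_not_vle, hnb']
    rfl
  have : pvACond src a b t s = true := pvACond_parts.mpr ⟨hOK, hv, htlt⟩
  rw [hc] at this
  cases this

theorem pvCond_false_of_imp {s : PVState} {src a b t : Int}
    (himp : pvVle (pvGetc s src a) t = true → pvVle (pvGetc s src b) t = true) :
    pvACond src a b t s = false := by
  rcases Bool.eq_false_or_eq_true (pvACond src a b t s) with h | h
  · obtain ⟨hOK, hv, htlt⟩ := pvACond_parts.mp h
    have hb := himp hv
    rw [pvTlt_eq_not_vle, hb] at htlt
    cases htlt
  · exact h

theorem pvFinal_cells {n : Int} (el : List (Int × Int × Int))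
    (hrange : ∀ x ∈ el, (0 ≤ x.1 ∧ x.1 < n) ∧ (0 ≤ x.2.1 ∧ x.2.1 < n))
    (hsorted : el.Pairwise (fun a b => a.2.2 ≤ b.2.2)) :
    ∀ r c, pvGetc (pvALoop n el (pvInit n)) r c = pvGetc (pvBLoop n el (pvInit n)) r c := by
  have hshI := pvInit_shape n
  have hshR : pvShape n (pvALoop n el (pvInit n)) := pvALoop_shape el _ hshI
  have hshB : pvShape n (pvBLoop n el (pvInit n)) := pvBLoop_shape el _ hshI
  have hRle : pvSLE (pvALoop n el (pvInit n)) (pvInit n) := pvALoop_le el _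
  have hBle : pvSLE (pvBLoop n el (pvInit n)) (pvInit n) := pvBLoop_le el _
  have hnfR : pvNoFire n el (pvALoop n el (pvInit n)) := pvALoop_nofire el _
  have hRB : pvSLE (pvALoop n el (pvInit n)) (pvBLoop n el (pvInit n)) := by
    refine pvBLoop_sound el _ ?_ hRle
    intro x hx src h0 hn
    have hmem : src ∈ PySem.List.pyRange 0 n 1 := PySem.List.mem_pyRange_one.mpr ⟨h0, hn⟩
    have hcond := hnfR x hx src hmem
    have hbx := hrange x hx
    exact ⟨pvImp_of_nofire hshR hcond.1 ⟨h0, hn, hbx.2.1, hbx.2.2⟩,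
      pvImp_of_nofire hshR hcond.2 ⟨h0, hn, hbx.1.1, hbx.1.2⟩⟩
  have hclB := pvBLoop_closed el _ hsorted hshI hrange
  have hnfB : pvNoFire n el (pvBLoop n el (pvInit n)) := by
    intro x hx src hsrc
    have hb := PySem.List.mem_pyRange_one.mp hsrc
    have h := hclB x hx src hb.1 hb.2
    exact ⟨pvCond_false_of_imp h.1, pvCond_false_of_imp h.2⟩
  have hBR : pvSLE (pvBLoop n el (pvInit n)) (pvALoop n el (pvInit n)) :=
    pvALoop_glb el hnfB hshB _ hshI hBle
  intro r c
  exact pvLeV_antisymm (hRB r c) (hBR r c)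

theorem pv_out_congr (n : Int) {f g : PVState}
    (h : ∀ r c, pvGetc f r c = pvGetc g r c) :
    (PySem.List.pyRange 0 n 1).foldl
      (fun out u =>
        (PySem.List.pyRange 0 n 1).foldl
          (fun out2 v =>
            if u ≠ v ∧ (pvGetc f u v).isSome then PySem.Set.add out2 (u, v) else out2)
          out)
      PySem.Set.empty =
    (PySem.List.pyRange 0 n 1).foldl
      (fun out u =>
        (PySem.List.pyRange 0 n 1).foldl
          (fun out2 v =>
            if u ≠ v ∧ (pvGetc g u v).isSome then PySem.Set.add out2 (u, v) else out2)
          out)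
      PySem.Set.empty := by
  have hfun : (fun (out : List (Int × Int)) (u : Int) =>
      (PySem.List.pyRange 0 n 1).foldl
        (fun out2 v =>
          if u ≠ v ∧ (pvGetc f u v).isSome then PySem.Set.add out2 (u, v) else out2)
        out) =
      (fun (out : List (Int × Int)) (u : Int) =>
      (PySem.List.pyRange 0 n 1).foldl
        (fun out2 v =>
          if u ≠ v ∧ (pvGetc g u v).isSome then PySem.Set.add out2 (u, v) else out2)
        out) := by
    funext out u
    have : (fun (out2 : List (Int × Int)) (v : Int) =>
        if u ≠ v ∧ (pvGetc f u v).isSome then PySem.Set.add out2 (u, v) else out2) =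
        (fun (out2 : List (Int × Int)) (v : Int) =>
        if u ≠ v ∧ (pvGetc g u v).isSome then PySem.Set.add out2 (u, v) else out2) := by
      funext out2 v
      rw [h u v]
    rw [this]
  rw [hfun]

theorem pv_main (active_edges : List (Int × Int)) (M : List (List Int)) (k : Int)
    (hpre : Pre_compute_reachability_set active_edges M k) :
    compute_reachability_set active_edges M k = compute_reachability_set_alt active_edges M k := by
  rcases hpre with ⟨hk0, _⟩ | ⟨hkpos, hedges⟩
  · -- no nodes: both output folds run over an empty range
    unfold compute_reachability_set compute_reachability_set_alt
    simp only [PySem.List.pyRange_one_eq_nil (show (2 * k : Int) ≤ 0 by omega),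
      List.foldl_nil]
  · unfold compute_reachability_set compute_reachability_set_alt
    apply pv_out_congr
    apply pvFinal_cells
    · intro x hx
      have hx' := (PySem.List.mem_sorted _ _ _ _).mp hx
      obtain ⟨p, hp, hxp⟩ := List.mem_map.mp hx'
      have hpb := hedges p hp
      rw [← hxp]
      obtain ⟨h1, h2, _, h3, h4, _⟩ := hpb
      refine ⟨⟨h1, h2⟩, ?_, ?_⟩
      · dsimp only; omega
      · dsimp only; omega
    · exact PySem.List.sorted_pairwise _ _

-- ===== VERDICT (by name: the statement is the Claim_ definition above) =====
theorem compute_reachability_set_spec : Claim_equal_compute_reachability_set := by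
  intro ae M k _ hpre
  unfold Spec_compute_reachability_set
  exact pv_main ae M k hpre
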